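-- pv_equiv track=rewrite | github.com/mokhairy/QGIS_plugins | Hou/Source Codes/APC_Planner.py | interleave_pattern
-- ===== SOURCE A (Python) =====
-- def interleave_pattern(list_a, list_b, a_count=4, b_count=1):
--     """
--     Return a new list that alternates items from A then B using
--     a_count : b_count pattern (default 4:1). Stops when both run out.
--     """
--     out = []
--     i = j = 0
--     n_a, n_b = len(list_a), len(list_b)
--     while i < n_a or j < n_b:
--         # Pull from A
--         take_a = min(a_count, n_a - i)
--         if take_a > 0:
--             out.extend(list_a[i:i+take_a])
--             i += take_a
--         # Pull from B
--         take_b = min(b_count, n_b - j)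
--         if take_b > 0:
--             out.extend(list_b[j:j+take_b])
--             j += take_b
--     return out
-- ===== SOURCE B (Python) =====
-- def interleave_pattern(list_a, list_b, a_count=4, b_count=1):
--     """
--     Same result, different decomposition: partition each list into its
--     chunk sequence up front, then merge the two chunk sequences in one
--     lockstep pass (no per-round min / pointer arithmetic).
--     """
--     def chunks(xs, k):
--         res = []
--         while xs:
--             res.append(xs[:k])
--             xs = xs[k:]
--         return res
--     a_chunks = chunks(list_a, a_count)
--     b_chunks = chunks(list_b, b_count)
--     out = []
--     while a_chunks or b_chunks:
--         if a_chunks: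
--             out.extend(a_chunks[0])
--             a_chunks = a_chunks[1:]
--         if b_chunks:
--             out.extend(b_chunks[0])
--             b_chunks = b_chunks[1:]
--     return out
-- ===== Notes on version B (the rewrite author's own statement) =====
-- stated objective: alternative
-- what changed: B partitions each list into its full chunk sequence up front and then merges the two chunk sequences in one lockstep pass, instead of A's single while loop that advances two pointers with a min() and a slice on each round.
import Mathlib
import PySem

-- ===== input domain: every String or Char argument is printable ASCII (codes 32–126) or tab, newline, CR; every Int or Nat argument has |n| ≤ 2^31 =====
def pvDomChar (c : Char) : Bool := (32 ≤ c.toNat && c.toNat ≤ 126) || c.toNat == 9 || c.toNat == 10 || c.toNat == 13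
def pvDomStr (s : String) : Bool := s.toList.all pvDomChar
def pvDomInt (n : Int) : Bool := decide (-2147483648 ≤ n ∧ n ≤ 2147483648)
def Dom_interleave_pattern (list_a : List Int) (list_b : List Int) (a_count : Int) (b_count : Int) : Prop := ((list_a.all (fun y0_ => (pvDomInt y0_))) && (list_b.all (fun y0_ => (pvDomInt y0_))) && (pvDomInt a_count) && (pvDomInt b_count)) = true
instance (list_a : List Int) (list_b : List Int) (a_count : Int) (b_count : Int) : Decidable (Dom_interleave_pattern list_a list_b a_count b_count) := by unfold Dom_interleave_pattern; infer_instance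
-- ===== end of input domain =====

-- B partitions each list into its chunk sequence up front and merges the two
-- chunk sequences in one lockstep pass (objective: alternative decomposition;
-- no speed claim). Equivalence is on the return value; neither program mutates
-- its arguments.

-- ===== PORT A =====
-- A's while loop over indices i, j ported as fuel recursion over the two
-- suffixes list_a[i:], list_b[j:] (the fuel only makes the function total:
-- under Pre_ each iteration consumes at least one element, so
-- |list_a| + |list_b| fuel is never exhausted before both suffixes are empty).
def ipA_go : Nat → Int → Int → List Int → List Int → List Int → List Int
  | 0, _, _, _, _, out => out
  | fuel+1, ac, bc, ra, rb, out =>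
    if 0 < ra.length || 0 < rb.length then
      -- take_a = min(a_count, n_a - i); out.extend(list_a[i:i+take_a]); i += take_a
      let ta : Int := min ac (ra.length : Int)
      let out1 := if 0 < ta then out ++ PySem.List.slice ra (some 0) (some ta) else out
      let ra1  := if 0 < ta then ra.drop ta.toNat else ra
      -- take_b = min(b_count, n_b - j); out.extend(list_b[j:j+take_b]); j += take_b
      let tb : Int := min bc (rb.length : Int)
      let out2 := if 0 < tb then out1 ++ PySem.List.slice rb (some 0) (some tb) else out1
      let rb1  := if 0 < tb then rb.drop tb.toNat else rb
      ipA_go fuel ac bc ra1 rb1 out2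
    else out

def interleave_pattern (list_a : List Int) (list_b : List Int) (a_count : Int) (b_count : Int) : List Int :=
  ipA_go (list_a.length + list_b.length) a_count b_count list_a list_b []

-- ===== PORT B =====
-- chunks(xs, k): while xs: res.append(xs[:k]); xs = xs[k:]   (fuel = |xs| for totality)
def chunksB_go : Nat → List Int → Int → List (List Int) → List (List Int)
  | 0, _, _, res => res
  | fuel+1, xs, k, res =>
    if xs.isEmpty then res
    else chunksB_go fuel (PySem.List.slice xs (some k) none) k (res ++ [PySem.List.slice xs none (some k)])

def chunksB (xs : List Int) (k : Int) : List (List Int) :=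
  chunksB_go xs.length xs k []

-- while a_chunks or b_chunks: if a_chunks: out.extend(a_chunks[0]); a_chunks = a_chunks[1:]; if b_chunks: …
def mergeB_go : List (List Int) → List (List Int) → List Int → List Int
  | [], [], out => out
  | ca :: as', [], out => mergeB_go as' [] (out ++ ca)
  | [], cb :: bs', out => mergeB_go [] bs' (out ++ cb)
  | ca :: as', cb :: bs', out => mergeB_go as' bs' (out ++ ca ++ cb)

def interleave_pattern_alt (list_a : List Int) (list_b : List Int) (a_count : Int) (b_count : Int) : List Int :=
  mergeB_go (chunksB list_a a_count) (chunksB list_b b_count) []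

-- ===== PRECONDITION & SPEC =====
-- Pre_ excludes only inputs on which A never returns: with a nonpositive count
-- and a nonempty corresponding list, A's while loop makes no progress on that
-- list and loops forever (B's chunking loop diverges there too).
def Pre_interleave_pattern (list_a : List Int) (list_b : List Int) (a_count : Int) (b_count : Int) : Prop :=
  (0 < a_count ∨ list_a = []) ∧ (0 < b_count ∨ list_b = [])
instance (list_a : List Int) (list_b : List Int) (a_count : Int) (b_count : Int) : Decidable (Pre_interleave_pattern list_a list_b a_count b_count) := by unfold Pre_interleave_pattern; infer_instance

def pvWitness_interleave_pattern : List Int × List Int × Int × Int := ([1, 2, 3, 4, 5, 6], [10, 20, 30], 4, 1)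

def Spec_interleave_pattern (list_a : List Int) (list_b : List Int) (a_count : Int) (b_count : Int) (out : List Int) : Prop := out = interleave_pattern_alt list_a list_b a_count b_count
instance (list_a : List Int) (list_b : List Int) (a_count : Int) (b_count : Int) (out : List Int) : Decidable (Spec_interleave_pattern list_a list_b a_count b_count out) := by unfold Spec_interleave_pattern; infer_instance

-- ===== CLAIM (what is proved, stated in full; the proofs are below) =====
def Claim_equal_interleave_pattern : Prop := ∀ (list_a : List Int) (list_b : List Int) (a_count : Int) (b_count : Int), Dom_interleave_pattern list_a list_b a_count b_count → Pre_interleave_pattern list_a list_b a_count b_count → Spec_interleave_pattern list_a list_b a_count b_count (interleave_pattern list_a list_b a_count b_count)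

-- ===== LEMMAS AND PROOFS =====

theorem chunksB_go_acc (fuel : Nat) (xs : List Int) (k : Int) (res : List (List Int)) :
    chunksB_go fuel xs k res = res ++ chunksB_go fuel xs k [] := by
  induction fuel generalizing xs res with
  | zero => simp [chunksB_go]
  | succ n ih =>
    simp only [chunksB_go]
    by_cases h : xs.isEmpty
    · simp [h]
    · simp only [h, if_neg, Bool.false_eq_true, not_false_iff]
      rw [ih _ (res ++ _), ih _ ([] ++ _)]
      simp

theorem chunksB_go_fuel (fuel fuel' : Nat) (xs : List Int) (k : Int)
    (h : xs.length ≤ fuel) (h' : xs.length ≤ fuel') (hk : 0 < k) :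
    chunksB_go fuel xs k [] = chunksB_go fuel' xs k [] := by
  induction fuel generalizing fuel' xs with
  | zero =>
    have : xs = [] := List.eq_nil_of_length_eq_zero (by omega)
    subst this
    cases fuel' <;> simp [chunksB_go]
  | succ n ih =>
    cases fuel' with
    | zero =>
      have : xs = [] := List.eq_nil_of_length_eq_zero (by omega)
      subst this; simp [chunksB_go]
    | succ m =>
      simp only [chunksB_go]
      by_cases he : xs.isEmpty
      · simp [he]
      · simp only [he, Bool.false_eq_true, if_false]
        have hxs : xs ≠ [] := by simpa [List.isEmpty_iff] using he
        have hlen : (PySem.List.slice xs (some k) none).length ≤ xs.length - 1 := by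
          rw [PySem.List.slice_from _ (le_of_lt hk)]
          have : 1 ≤ k.toNat := by omega
          simp [List.length_drop]
          omega
        rw [chunksB_go_acc n, chunksB_go_acc m]
        rw [ih m (PySem.List.slice xs (some k) none) (by omega) (by omega)]

-- one unfolding of chunksB on a nonempty list, with canonical fuel
theorem chunksB_cons (xs : List Int) (k : Int) (hxs : xs ≠ []) (hk : 0 < k) :
    chunksB xs k = xs.take k.toNat :: chunksB (xs.drop k.toNat) k := by
  unfold chunksB
  cases hl : xs.length with
  | zero => exact absurd (List.eq_nil_of_length_eq_zero hl) hxs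
  | succ n =>
    simp only [chunksB_go]
    have he : xs.isEmpty = false := by simpa [List.isEmpty_iff] using hxs
    simp only [he, Bool.false_eq_true, if_false]
    rw [chunksB_go_acc]
    rw [PySem.List.slice_from _ (le_of_lt hk), PySem.List.slice_to _ (le_of_lt hk)]
    simp only [List.nil_append, List.singleton_append]
    congr 1
    apply chunksB_go_fuel _ _ _ _ _ _ hk
    · simp [List.length_drop]; omega
    · simp [List.length_drop]

theorem chunksB_nil (k : Int) : chunksB [] k = [] := by simp [chunksB, chunksB_go]

-- main invariant: A's fuelled loop on suffixes ra, rb computes B's chunk merge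
theorem take_min_self (xs : List Int) (k : Nat) : xs.take (min k xs.length) = xs.take k := by
  rcases le_total k xs.length with h | h
  · rw [Nat.min_eq_left h]
  · rw [Nat.min_eq_right h, List.take_length, List.take_of_length_le h]

theorem drop_min_self (xs : List Int) (k : Nat) : xs.drop (min k xs.length) = xs.drop k := by
  rcases le_total k xs.length with h | h
  · rw [Nat.min_eq_left h]
  · rw [Nat.min_eq_right h, List.drop_length, List.drop_eq_nil_of_le h]

theorem ipA_go_eq (ac bc : Int) (fuel : Nat) :
    ∀ (ra rb : List Int) (out : List Int),
      (0 < ac ∨ ra = []) → (0 < bc ∨ rb = []) → ra.length + rb.length ≤ fuel →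
      ipA_go fuel ac bc ra rb out = mergeB_go (chunksB ra ac) (chunksB rb bc) out := by
  induction fuel with
  | zero =>
    intro ra rb out _ _ hle
    have hra : ra = [] := List.eq_nil_of_length_eq_zero (by omega)
    have hrb : rb = [] := List.eq_nil_of_length_eq_zero (by omega)
    subst hra; subst hrb
    simp [ipA_go, chunksB_nil, mergeB_go]
  | succ n ih =>
    intro ra rb out ha hb hle
    by_cases hra : ra = []
    · subst hra
      by_cases hrb : rb = []
      · subst hrb; simp [ipA_go, chunksB_nil, mergeB_go]
      · -- ra empty, rb nonempty: bc > 0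
        have hbc : 0 < bc := hb.resolve_right hrb
        have hrbl : 0 < rb.length := List.length_pos_of_ne_nil hrb
        simp only [ipA_go]
        rw [if_pos (by simp [hrbl])]
        have hta : ¬ (0 < min ac (([] : List Int).length : Int)) := by simp
        have htb : 0 < min bc (rb.length : Int) := by
          simp only [lt_min_iff]; exact ⟨hbc, by exact_mod_cast hrbl⟩
        simp only [hta, if_false, htb, if_true]
        rw [PySem.List.slice_zero_start, PySem.List.slice_to _ (le_of_lt htb)]
        have htbn : (min bc (rb.length : Int)).toNat = min bc.toNat rb.length := by omega
        rw [ih [] (rb.drop (min bc (rb.length : Int)).toNat) _ ha (Or.inl hbc)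
            (by rw [List.length_nil, List.length_drop, htbn]; omega)]
        rw [chunksB_cons rb bc hrb hbc]
        simp only [mergeB_go, chunksB_nil]
        rw [htbn, take_min_self rb bc.toNat, drop_min_self rb bc.toNat]
    · -- ra nonempty: ac > 0
      have hac : 0 < ac := ha.resolve_right hra
      have hral : 0 < ra.length := List.length_pos_of_ne_nil hra
      simp only [ipA_go]
      rw [if_pos (by simp [hral])]
      have hta : 0 < min ac (ra.length : Int) := by
        simp only [lt_min_iff]; exact ⟨hac, by exact_mod_cast hral⟩
      simp only [hta, if_true]
      rw [PySem.List.slice_zero_start, PySem.List.slice_to _ (le_of_lt hta)]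
      have htan : (min ac (ra.length : Int)).toNat = min ac.toNat ra.length := by omega
      by_cases hrb : rb = []
      · subst hrb
        have htb : ¬ (0 < min bc (([] : List Int).length : Int)) := by simp
        simp only [htb, if_false]
        rw [ih (ra.drop (min ac (ra.length : Int)).toNat) [] _ (Or.inl hac) hb
            (by rw [List.length_drop, htan, List.length_nil]; omega)]
        rw [chunksB_cons ra ac hra hac]
        simp only [chunksB_nil, mergeB_go]
        rw [htan, take_min_self ra ac.toNat, drop_min_self ra ac.toNat]
      · have hbc : 0 < bc := hb.resolve_right hrb
        have hrbl : 0 < rb.length := List.length_pos_of_ne_nil hrb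
        have htb : 0 < min bc (rb.length : Int) := by
          simp only [lt_min_iff]; exact ⟨hbc, by exact_mod_cast hrbl⟩
        simp only [htb, if_true]
        rw [PySem.List.slice_zero_start, PySem.List.slice_to _ (le_of_lt htb)]
        have htbn : (min bc (rb.length : Int)).toNat = min bc.toNat rb.length := by omega
        rw [ih (ra.drop (min ac (ra.length : Int)).toNat)
               (rb.drop (min bc (rb.length : Int)).toNat) _ (Or.inl hac) (Or.inl hbc)
               (by rw [List.length_drop, List.length_drop, htan, htbn]; omega)]
        rw [chunksB_cons ra ac hra hac, chunksB_cons rb bc hrb hbc]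
        simp only [mergeB_go]
        rw [htan, htbn, take_min_self ra ac.toNat, drop_min_self ra ac.toNat,
            take_min_self rb bc.toNat, drop_min_self rb bc.toNat]

-- ===== VERDICT (by name: the statement is the Claim_ definition above) =====
theorem interleave_pattern_spec : Claim_equal_interleave_pattern := by
  intro la lb ac bc _ hpre
  unfold Spec_interleave_pattern interleave_pattern interleave_pattern_alt
  rw [ipA_go_eq ac bc (la.length + lb.length) la lb [] hpre.1 hpre.2 (le_refl _)]
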